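-- pv_equiv track=rewrite | github.com/7themadhatter7/allwatchedoverbymachinesoflovinggrace.github.io | e8_platform_release/e8_arc_agent/e8_composer.py | _check_position_local
-- ===== SOURCE A (Python) =====
-- def _check_position_local(inputs, outputs):
--     """Check if output[i] depends only on input[i]."""
--     if not inputs:
--         return True
--     for inp, out in zip(inputs, outputs):
--         if len(inp) != len(out):
--             return False
--     # Check: same input value at same position -> same output?
--     pos_maps = {}
--     for inp, out in zip(inputs, outputs):
--         for i, (iv, ov) in enumerate(zip(inp, out)):
--             key = (i, iv)
--             if key in pos_maps and pos_maps[key] != ov: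
--                 return False
--             pos_maps[key] = ov
--     return True
-- ===== SOURCE B (Python) =====
-- def _check_position_local(inputs, outputs):
--     """Check if output[i] depends only on input[i]."""
--     if any(len(inp) != len(out) for inp, out in zip(inputs, outputs)):
--         return False
--     # Flatten to (position, input value, output value) triples, sort them by
--     # (position, input value) so equal keys become adjacent, then a single
--     # adjacent-pair scan detects any key mapped to two different outputs.
--     trips = [(i, iv, ov) for inp, out in zip(inputs, outputs)
--              for i, (iv, ov) in enumerate(zip(inp, out))]
--     trips.sort(key=lambda t: (t[0], t[1]))
--     return all(a[0] != b[0] or a[1] != b[1] or a[2] == b[2]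
--                for a, b in zip(trips, trips[1:]))
-- ===== Notes on version B (the rewrite author's own statement) =====
-- stated objective: alternative
-- what changed: A detects conflicts on insert into a (position,value)->output hash map with an early return; B uses no map at all: it flattens everything to (position,input,output) triples, sorts them by (position,input) so equal keys become adjacent, and verifies functionality with one adjacent-pair scan (it also drops A's redundant empty-inputs guard).
import Mathlib
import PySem

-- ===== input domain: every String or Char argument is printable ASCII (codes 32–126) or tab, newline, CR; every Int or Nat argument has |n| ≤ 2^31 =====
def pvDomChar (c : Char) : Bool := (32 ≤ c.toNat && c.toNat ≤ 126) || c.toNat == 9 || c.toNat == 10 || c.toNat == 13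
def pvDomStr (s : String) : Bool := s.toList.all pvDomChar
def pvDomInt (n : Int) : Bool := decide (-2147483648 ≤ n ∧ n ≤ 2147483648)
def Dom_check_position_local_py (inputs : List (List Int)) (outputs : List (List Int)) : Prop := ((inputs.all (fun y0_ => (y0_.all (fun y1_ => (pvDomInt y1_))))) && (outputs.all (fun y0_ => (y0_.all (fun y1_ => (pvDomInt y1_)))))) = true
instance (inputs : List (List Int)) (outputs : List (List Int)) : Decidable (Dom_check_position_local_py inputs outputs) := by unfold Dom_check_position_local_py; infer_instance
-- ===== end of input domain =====

-- B replaces A's hash-map detect-on-insert by flatten → sort by (position, input value) → one adjacent-pair scan; the return values are proved equal (the sort is not faster).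

-- ===== PORT A =====
-- the length-check loop with its early `return False`
def pvLenLoop : List (List Int × List Int) → Bool
  | [] => true
  | (inp, out) :: rest => if inp.length != out.length then false else pvLenLoop rest

-- inner loop over enumerate(zip(inp, out)); `none` = the early `return False`
def pvInnerA : List (Int × (Int × Int)) → PySem.Dict (Int × Int) Int → Option (PySem.Dict (Int × Int) Int)
  | [], d => some d
  | (i, (iv, ov)) :: rest, d =>
    match d.get? (i, iv) with
    | some w => if w ≠ ov then none else pvInnerA rest (d.insert (i, iv) ov)
    | none => pvInnerA rest (d.insert (i, iv) ov)

def pvOuterA : List (List Int × List Int) → PySem.Dict (Int × Int) Int → Bool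
  | [], _ => true
  | (inp, out) :: rest, d =>
    match pvInnerA (PySem.List.enumerate (inp.zip out) 0) d with
    | none => false
    | some d' => pvOuterA rest d'

def check_position_local_py (inputs : List (List Int)) (outputs : List (List Int)) : Bool :=
  if inputs.isEmpty then true
  else if pvLenLoop (inputs.zip outputs) then pvOuterA (inputs.zip outputs) PySem.Dict.empty
  else false

-- ===== PORT B =====
-- trips[1:] on a list is List.drop 1 (exact); sorted by key (t[0], t[1]) is PySem.List.sorted2
def check_position_local_py_alt (inputs : List (List Int)) (outputs : List (List Int)) : Bool :=
  if (inputs.zip outputs).any (fun p => p.1.length != p.2.length) then false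
  else
    let trips := (inputs.zip outputs).flatMap (fun p =>
      (PySem.List.enumerate (p.1.zip p.2) 0).map (fun e => (e.1, e.2.1, e.2.2)))
    let s := PySem.List.sorted2 trips (fun t => t.1) (fun t => t.2.1)
    (s.zip (s.drop 1)).all (fun ab =>
      ab.1.1 != ab.2.1 || ab.1.2.1 != ab.2.2.1 || ab.1.2.2 == ab.2.2.2)

-- ===== PRECONDITION & SPEC =====
def Spec_check_position_local_py (inputs : List (List Int)) (outputs : List (List Int)) (out : Bool) : Prop := out = check_position_local_py_alt inputs outputs
instance (inputs : List (List Int)) (outputs : List (List Int)) (out : Bool) : Decidable (Spec_check_position_local_py inputs outputs out) := by unfold Spec_check_position_local_py; infer_instance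

-- ===== CLAIM (what is proved, stated in full; the proofs are below) =====
def Claim_equal_check_position_local_py : Prop := ∀ (inputs : List (List Int)) (outputs : List (List Int)), Dom_check_position_local_py inputs outputs → Spec_check_position_local_py inputs outputs (check_position_local_py inputs outputs)

-- ===== LEMMAS AND PROOFS =====

-- a keyed pair ((i, iv), ov)
def pvTrip (e : Int × (Int × Int)) : (Int × Int) × Int := ((e.1, e.2.1), e.2.2)

-- the flat stream of keyed pairs A processes
def pvTrips (pairs : List (List Int × List Int)) : List ((Int × Int) × Int) :=
  pairs.flatMap (fun p => (PySem.List.enumerate (p.1.zip p.2) 0).map pvTrip)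

-- generic A-side fold over keyed pairs
def pvFoldA : List ((Int × Int) × Int) → PySem.Dict (Int × Int) Int → Option (PySem.Dict (Int × Int) Int)
  | [], d => some d
  | (k, v) :: rest, d =>
    match d.get? k with
    | some w => if w ≠ v then none else pvFoldA rest (d.insert k v)
    | none => pvFoldA rest (d.insert k v)

def pvGood (l : List ((Int × Int) × Int)) : Prop :=
  ∀ p ∈ l, ∀ q ∈ l, p.1 = q.1 → p.2 = q.2

-- B-side vocabulary: triples, their lexicographic key order, functionality
def pvF (kv : (Int × Int) × Int) : Int × Int × Int := (kv.1.1, kv.1.2, kv.2)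

def pvGoodT (l : List (Int × Int × Int)) : Prop :=
  ∀ p ∈ l, ∀ q ∈ l, p.1 = q.1 → p.2.1 = q.2.1 → p.2.2 = q.2.2

def pvLtT (a b : Int × Int × Int) : Bool :=
  decide (a.1 < b.1) || (!decide (b.1 < a.1) && decide (a.2.1 < b.2.1))

def pvLeT (a b : Int × Int × Int) : Prop :=
  a.1 < b.1 ∨ (a.1 = b.1 ∧ a.2.1 ≤ b.2.1)

def pvAdjOK (s : List (Int × Int × Int)) : Bool :=
  (s.zip (s.drop 1)).all (fun ab =>
    ab.1.1 != ab.2.1 || ab.1.2.1 != ab.2.2.1 || ab.1.2.2 == ab.2.2.2)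

theorem pvInnerA_eq_foldA (l : List (Int × (Int × Int))) (d : PySem.Dict (Int × Int) Int) :
    pvInnerA l d = pvFoldA (l.map pvTrip) d := by
  induction l generalizing d with
  | nil => rfl
  | cons e rest ih =>
    obtain ⟨i, iv, ov⟩ := e
    simp only [pvInnerA, List.map, pvTrip, pvFoldA]
    cases d.get? (i, iv) with
    | none => exact ih _
    | some w =>
      by_cases h : w ≠ ov <;> simp [h, ih]

theorem pvFoldA_append (xs ys : List ((Int × Int) × Int)) (d : PySem.Dict (Int × Int) Int) :
    pvFoldA (xs ++ ys) d = (pvFoldA xs d).bind (fun d' => pvFoldA ys d') := by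
  induction xs generalizing d with
  | nil => rfl
  | cons t rest ih =>
    obtain ⟨k, v⟩ := t
    simp only [List.cons_append, pvFoldA]
    cases d.get? k with
    | none => exact ih _
    | some w => by_cases h : w ≠ v <;> simp [h, ih]

theorem pvOuterA_eq (rows : List (List Int × List Int)) (d : PySem.Dict (Int × Int) Int) :
    pvOuterA rows d = (pvFoldA (pvTrips rows) d).isSome := by
  induction rows generalizing d with
  | nil => rfl
  | cons r rest ih =>
    obtain ⟨inp, out⟩ := r
    simp only [pvOuterA, pvTrips, List.flatMap_cons, pvFoldA_append, pvInnerA_eq_foldA]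
    cases pvFoldA ((PySem.List.enumerate (inp.zip out) 0).map pvTrip) d with
    | none => rfl
    | some d' => simpa [pvTrips] using ih d'

-- folding one pair into the dict shifts the per-element condition by exactly the head's compatibility
theorem pvStepIff (k : Int × Int) (v : Int) (rest : List ((Int × Int) × Int))
    (d : PySem.Dict (Int × Int) Int) (hd : ∀ w, d.get? k = some w → w = v) :
    (∀ p ∈ rest, ∀ w, (d.insert k v).get? p.1 = some w → w = p.2)
      ↔ ((∀ b ∈ rest, k = b.1 → v = b.2) ∧
         ∀ p ∈ rest, ∀ w, d.get? p.1 = some w → w = p.2) := by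
  constructor
  · intro h
    refine ⟨fun b hb h1 => h b hb v (by rw [PySem.Dict.get?_insert, if_pos h1.symm]), ?_⟩
    intro p hp w hw
    by_cases hk : p.1 = k
    · have hv := h p hp v (by rw [PySem.Dict.get?_insert, if_pos hk])
      rw [hk] at hw
      exact (hd w hw).trans hv
    · exact h p hp w (by rw [PySem.Dict.get?_insert, if_neg hk]; exact hw)
  · rintro ⟨h1, h2⟩ p hp w hw
    rw [PySem.Dict.get?_insert] at hw
    by_cases hk : p.1 = k
    · rw [if_pos hk] at hw
      exact (Option.some.inj hw).symm.trans (h1 p hp hk.symm)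
    · rw [if_neg hk] at hw
      exact h2 p hp w hw

-- characterisation of A's detect-on-insert fold
theorem pvFoldA_isSome_iff (l : List ((Int × Int) × Int)) (d : PySem.Dict (Int × Int) Int) :
    (pvFoldA l d).isSome = true ↔
      (List.Pairwise (fun a b => a.1 = b.1 → a.2 = b.2) l ∧
       ∀ p ∈ l, ∀ w, d.get? p.1 = some w → w = p.2) := by
  induction l generalizing d with
  | nil => simp [pvFoldA]
  | cons t rest ih =>
    obtain ⟨k, v⟩ := t
    simp only [pvFoldA]
    cases hd : d.get? k with
    | none =>
      rw [ih, List.pairwise_cons,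
        pvStepIff k v rest d (fun w hw => by rw [hd] at hw; cases hw)]
      constructor
      · rintro ⟨hp, hhead, hrest⟩
        refine ⟨⟨fun b hb h1 => hhead b hb h1, hp⟩, ?_⟩
        intro p hp' w hw
        rcases List.mem_cons.mp hp' with rfl | hm
        · exact absurd hw (by simp [hd])
        · exact hrest p hm w hw
      · rintro ⟨⟨hh, hp⟩, hcond⟩
        exact ⟨hp, fun b hb h1 => hh b hb h1,
          fun p hm w hw => hcond p (List.mem_cons_of_mem _ hm) w hw⟩
    | some w =>
      dsimp only
      by_cases h : w = v
      · subst h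
        rw [if_neg (fun hc => hc rfl), ih, List.pairwise_cons,
          pvStepIff k w rest d (fun w' hw' => by rw [hd] at hw'; exact (Option.some.inj hw').symm)]
        constructor
        · rintro ⟨hp, hhead, hrest⟩
          refine ⟨⟨fun b hb h1 => hhead b hb h1, hp⟩, ?_⟩
          intro p hp' w' hw'
          rcases List.mem_cons.mp hp' with rfl | hm
          · rw [hd] at hw'
            exact (Option.some.inj hw').symm
          · exact hrest p hm w' hw'
        · rintro ⟨⟨hh, hp⟩, hcond⟩
          exact ⟨hp, fun b hb h1 => hh b hb h1,
            fun p hm w' hw' => hcond p (List.mem_cons_of_mem _ hm) w' hw'⟩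
      · rw [if_pos h]
        constructor
        · intro hc; simp at hc
        · rintro ⟨_, hcond⟩
          exact absurd (hcond (k, v) List.mem_cons_self w hd) h

theorem pvPairwise_iff_good (l : List ((Int × Int) × Int)) :
    List.Pairwise (fun a b => a.1 = b.1 → a.2 = b.2) l ↔ pvGood l := by
  constructor
  · intro h p hp q hq h1
    by_cases hpq : p = q
    · rw [hpq]
    · have hsym : Symmetric (fun (a b : (Int × Int) × Int) => a.1 = b.1 → a.2 = b.2) :=
        fun a b hab hba => (hab hba.symm).symm
      exact List.Pairwise.forall hsym h hp hq hpq h1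
  · intro h
    exact List.pairwise_of_forall_mem_list (fun a ha b hb => h a ha b hb)

theorem pvLenLoop_eq (zs : List (List Int × List Int)) :
    pvLenLoop zs = !(zs.any (fun p => p.1.length != p.2.length)) := by
  induction zs with
  | nil => rfl
  | cons z rest ih =>
    obtain ⟨inp, out⟩ := z
    by_cases h : inp.length = out.length <;> simp [pvLenLoop, h, ih]

-- B-SIDE LEMMAS

theorem pvLtT_false_iff (a b : Int × Int × Int) : pvLtT b a = false ↔ pvLeT a b := by
  simp only [pvLtT, pvLeT, Bool.or_eq_false_iff, Bool.and_eq_false_iff, decide_eq_false_iff_not,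
    Bool.not_eq_false', decide_eq_true_eq, not_lt]
  omega

theorem pvLtT_true_le (a b : Int × Int × Int) (h : pvLtT a b = true) : pvLeT a b := by
  simp only [pvLtT, Bool.or_eq_true, Bool.and_eq_true, decide_eq_true_eq,
    Bool.not_eq_true', decide_eq_false_iff_not, not_lt] at h
  simp only [pvLeT]
  omega

theorem pvLeT_trans (a b c : Int × Int × Int) (h1 : pvLeT a b) (h2 : pvLeT b c) : pvLeT a c := by
  simp only [pvLeT] at *; omega

theorem pvInsertBy_pairwise (x : Int × Int × Int) (l : List (Int × Int × Int))
    (h : l.Pairwise pvLeT) : (PySem.List.insertBy pvLtT x l).Pairwise pvLeT := by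
  induction l with
  | nil => simp [PySem.List.insertBy]
  | cons y ys ih =>
    rw [List.pairwise_cons] at h
    obtain ⟨hy, hys⟩ := h
    simp only [PySem.List.insertBy]
    by_cases hb : pvLtT x y = true
    · rw [if_pos hb]
      refine List.pairwise_cons.mpr ⟨?_, List.pairwise_cons.mpr ⟨hy, hys⟩⟩
      intro z hz
      rcases List.mem_cons.mp hz with rfl | hm
      · exact pvLtT_true_le x z hb
      · exact pvLeT_trans x y z (pvLtT_true_le x y hb) (hy z hm)
    · rw [if_neg hb]
      refine List.pairwise_cons.mpr ⟨?_, ih hys⟩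
      intro z hz
      rcases (PySem.List.mem_insertBy pvLtT x z ys).mp hz with rfl | hm
      · exact (pvLtT_false_iff y z).mp (Bool.eq_false_iff.mpr hb)
      · exact hy z hm

theorem pvFoldInsert_pairwise (xs : List (Int × Int × Int)) (acc : List (Int × Int × Int))
    (h : acc.Pairwise pvLeT) :
    (xs.foldl (fun acc x => PySem.List.insertBy pvLtT x acc) acc).Pairwise pvLeT := by
  induction xs generalizing acc with
  | nil => exact h
  | cons x rest ih => exact ih _ (pvInsertBy_pairwise x acc h)

theorem pvSorted2_pairwise (xs : List (Int × Int × Int)) :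
    (PySem.List.sorted2 xs (fun t => t.1) (fun t => t.2.1)).Pairwise pvLeT := by
  exact pvFoldInsert_pairwise xs [] List.Pairwise.nil

-- adjacency check follows from full functionality (the two neighbours are members)
theorem pvAdj_of_good (s : List (Int × Int × Int)) (hg : pvGoodT s) : pvAdjOK s = true := by
  rw [pvAdjOK, List.all_eq_true]
  intro ab hab
  have h1 : ab.1 ∈ s := List.of_mem_zip hab |>.1
  have h2 : ab.2 ∈ s := (List.drop_subset 1 s) (List.of_mem_zip hab |>.2)
  by_cases e1 : ab.1.1 = ab.2.1
  · by_cases e2 : ab.1.2.1 = ab.2.2.1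
    · have := hg ab.1 h1 ab.2 h2 e1 e2
      simp [this]
    · simp [e2]
  · simp [e1]

-- one adjacency step peeled off the front of the scan
theorem pvAdjOK_cons (a b : Int × Int × Int) (tl : List (Int × Int × Int)) :
    pvAdjOK (a :: b :: tl) = true ↔
      ((a.1 = b.1 → a.2.1 = b.2.1 → a.2.2 = b.2.2) ∧ pvAdjOK (b :: tl) = true) := by
  simp only [pvAdjOK, List.drop_one, List.tail_cons, List.zip_cons_cons, List.all_cons,
    Bool.and_eq_true, Bool.or_eq_true, bne_iff_ne, ne_eq, beq_iff_eq]
  tauto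

-- in a key-sorted list, adjacency suffices for full functionality
theorem pvGood_of_adj (s : List (Int × Int × Int)) (hs : s.Pairwise pvLeT)
    (ha : pvAdjOK s = true) : pvGoodT s := by
  induction s with
  | nil => intro p hp; simp at hp
  | cons a tail ih =>
    rw [List.pairwise_cons] at hs
    obtain ⟨hhead, htail⟩ := hs
    cases tail with
    | nil =>
      intro p hp q hq _ _
      simp only [List.mem_singleton] at hp hq
      rw [hp, hq]
    | cons b tl =>
      obtain ⟨hab, hrest⟩ := (pvAdjOK_cons a b tl).mp ha
      have hgt : pvGoodT (b :: tl) := ih htail hrest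
      -- the head agrees with every same-key member of the tail
      have haux : ∀ q ∈ b :: tl, a.1 = q.1 → a.2.1 = q.2.1 → a.2.2 = q.2.2 := by
        intro q hq e1 e2
        rcases List.mem_cons.mp hq with rfl | hm
        · exact hab e1 e2
        · have habL : pvLeT a b := hhead b List.mem_cons_self
          have hbq : pvLeT b q := (List.pairwise_cons.mp htail).1 q hm
          have hb1 : a.1 = b.1 ∧ a.2.1 = b.2.1 := by
            simp only [pvLeT] at habL hbq; omega
          have hval : a.2.2 = b.2.2 := hab hb1.1 hb1.2
          have : b.2.2 = q.2.2 :=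
            hgt b List.mem_cons_self q (List.mem_cons.mpr (Or.inr hm))
              (hb1.1.symm.trans e1) (hb1.2.symm.trans e2)
          exact hval.trans this
      intro p hp q hq e1 e2
      rcases List.mem_cons.mp hp with rfl | hpm
      · rcases List.mem_cons.mp hq with rfl | hqm
        · rfl
        · exact haux q hqm e1 e2
      · rcases List.mem_cons.mp hq with rfl | hqm
        · exact (haux p hpm e1.symm e2.symm).symm
        · exact hgt p hpm q hqm e1 e2

theorem pvGoodT_iff_of_same_mem (s t : List (Int × Int × Int))
    (h : ∀ x, x ∈ s ↔ x ∈ t) : (pvGoodT s ↔ pvGoodT t) :=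
  ⟨fun hg p hp q hq => hg p ((h p).mpr hp) q ((h q).mpr hq),
   fun hg p hp q hq => hg p ((h p).mp hp) q ((h q).mp hq)⟩

theorem pvGood_iff_goodT_map (l : List ((Int × Int) × Int)) :
    pvGood l ↔ pvGoodT (l.map pvF) := by
  constructor
  · intro hg p hp q hq e1 e2
    obtain ⟨p', hp', rfl⟩ := List.mem_map.mp hp
    obtain ⟨q', hq', rfl⟩ := List.mem_map.mp hq
    simp only [pvF] at e1 e2 ⊢
    have : p'.1 = q'.1 := Prod.ext e1 e2
    exact hg p' hp' q' hq' this
  · intro hg p hp q hq e1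
    exact hg (pvF p) (List.mem_map_of_mem hp) (pvF q) (List.mem_map_of_mem hq)
      (show p.1.1 = q.1.1 by rw [e1]) (show p.1.2 = q.1.2 by rw [e1])

-- B's flat triple stream is exactly A's keyed stream, re-bracketed
theorem pvTripsB_eq (pairs : List (List Int × List Int)) :
    (pairs.flatMap (fun p =>
      (PySem.List.enumerate (p.1.zip p.2) 0).map (fun e => (e.1, e.2.1, e.2.2))))
      = (pvTrips pairs).map pvF := by
  simp only [pvTrips, List.map_flatMap, List.map_map]
  rfl

-- ===== VERDICT (by name: the statement is the Claim_ definition above) =====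
theorem check_position_local_py_spec : Claim_equal_check_position_local_py := by
  unfold Claim_equal_check_position_local_py
  intro inputs outputs _
  unfold Spec_check_position_local_py
  have ha : check_position_local_py inputs outputs =
      if ((inputs.zip outputs).any fun p => p.1.length != p.2.length) then false
      else (pvFoldA (pvTrips (inputs.zip outputs)) PySem.Dict.empty).isSome := by
    unfold check_position_local_py
    rw [pvLenLoop_eq, pvOuterA_eq]
    cases inputs with
    | nil => simp [pvTrips, pvFoldA]
    | cons a rest =>
      simp only [List.isEmpty_cons, Bool.false_eq_true, if_false]
      by_cases h : (((a :: rest).zip outputs).any fun p => p.1.length != p.2.length) <;> simp [h]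
  rw [ha]
  simp only [check_position_local_py_alt, pvTripsB_eq]
  by_cases h : ((inputs.zip outputs).any fun p => p.1.length != p.2.length)
  · simp [h]
  · simp only [h, Bool.false_eq_true, if_false]
    rw [Bool.eq_iff_iff, pvFoldA_isSome_iff, pvPairwise_iff_good]
    have hperm := PySem.List.sorted2_perm ((pvTrips (inputs.zip outputs)).map pvF)
      (fun t : Int × Int × Int => t.1) (fun t => t.2.1) false
    have hmem : ∀ x, x ∈ PySem.List.sorted2 ((pvTrips (inputs.zip outputs)).map pvF)
        (fun t : Int × Int × Int => t.1) (fun t => t.2.1) false ↔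
        x ∈ (pvTrips (inputs.zip outputs)).map pvF := fun x => hperm.mem_iff
    constructor
    · rintro ⟨h1, _⟩
      exact pvAdj_of_good _ (((pvGoodT_iff_of_same_mem _ _ hmem).mpr)
        ((pvGood_iff_goodT_map _).mp h1))
    · intro hadj
      refine ⟨(pvGood_iff_goodT_map _).mpr ((pvGoodT_iff_of_same_mem _ _ hmem).mp
        (pvGood_of_adj _ (pvSorted2_pairwise _) hadj)), ?_⟩
      intro p _ w hw
      rw [PySem.Dict.get?_empty] at hw; cases hw
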